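-- pv_equiv track=rewrite | github.com/gimpnongu7/batchmark | batchmark/matrix.py | _expand_matrix
-- ===== SOURCE A (Python) =====
-- from typing import Dict, List, Any
--
-- def _expand_matrix(matrix: Dict[str, List[Any]]) -> List[Dict[str, Any]]:
--     """Cartesian product of all matrix variable lists."""
--     keys = list(matrix.keys())
--     if not keys:
--         return [{}]
--     combos: List[Dict[str, Any]] = [{}]
--     for key in keys:
--         new_combos = []
--         for combo in combos:
--             for val in matrix[key]:
--                 new_combos.append({**combo, key: val})
--         combos = new_combos
--     return combos
-- ===== SOURCE B (Python) =====
-- from typing import Dict, List, Any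
--
--
-- def _product(lists: List[List[Any]]) -> List[tuple]:
--     if not lists:
--         return [()]
--     head, tail = lists[0], lists[1:]
--     rest = _product(tail)
--     return [(v,) + r for v in head for r in rest]
--
--
-- def _expand_matrix(matrix: Dict[str, List[Any]]) -> List[Dict[str, Any]]:
--     """Cartesian product of all matrix variable lists."""
--     keys = list(matrix.keys())
--     return [dict(zip(keys, tup)) for tup in _product(list(matrix.values()))]
-- ===== Notes on version B (the rewrite author's own statement) =====
-- stated objective: alternative
-- what changed: A grows a list of partial dicts key by key, copying every partial dict once per value; B first builds all value tuples by recursion on the list of value lists, then labels each tuple with the keys in a second phase.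
import Mathlib
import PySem

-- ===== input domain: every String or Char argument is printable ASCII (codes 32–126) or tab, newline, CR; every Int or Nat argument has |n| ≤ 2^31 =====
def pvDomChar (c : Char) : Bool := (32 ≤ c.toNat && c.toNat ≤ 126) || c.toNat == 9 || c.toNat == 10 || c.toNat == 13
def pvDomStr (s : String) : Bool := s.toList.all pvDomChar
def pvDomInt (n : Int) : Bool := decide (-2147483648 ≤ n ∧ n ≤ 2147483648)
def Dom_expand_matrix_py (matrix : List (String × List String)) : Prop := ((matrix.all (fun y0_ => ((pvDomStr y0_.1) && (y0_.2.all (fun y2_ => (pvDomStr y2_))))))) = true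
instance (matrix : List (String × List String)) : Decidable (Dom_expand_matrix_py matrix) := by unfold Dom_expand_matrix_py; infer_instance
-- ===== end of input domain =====

-- B replaces A's incremental grow-and-copy dict loop by a two-phase decomposition:
-- recursively build all value tuples, then label each tuple with the keys (objective: alternative).

-- ===== PORT A =====
-- literal transliteration of A: combos grows key by key, each step appending {**combo, key: val}
def expand_matrix_py (matrix : List (String × List String)) : List (List (String × String)) :=
  let d : PySem.Dict String (List String) := PySem.Dict.mk matrix
  let keys := d.keys
  if keys = [] then [[]]
  else
    let combos : List (PySem.Dict String String) :=
      keys.foldl (fun combos key =>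
        combos.foldl (fun newCombos combo =>
          ((d.get? key).getD []).foldl
            (fun newCombos val => newCombos ++ [combo.insert key val]) newCombos) [])
        [PySem.Dict.empty]
    combos.map PySem.Dict.items

-- ===== PORT B =====
-- port of Source B's _product: recursion on the list of value lists
def pvProduct (lists : List (List String)) : List (List String) :=
  match lists with
  | [] => [[]]
  | head :: tail =>
      let rest := pvProduct tail
      head.flatMap (fun v => rest.map (fun r => v :: r))

def expand_matrix_py_alt (matrix : List (String × List String)) : List (List (String × String)) :=
  let d : PySem.Dict String (List String) := PySem.Dict.mk matrix
  let keys := d.keys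
  (pvProduct d.values).map (fun tup => (PySem.Dict.ofList (keys.zip tup)).items)

-- ===== PRECONDITION & SPEC =====
-- Pre_ excludes association lists with duplicate keys: a Python dict cannot carry duplicate
-- keys, so such lists correspond to no input the Python function can receive.
def Pre_expand_matrix_py (matrix : List (String × List String)) : Prop :=
  (matrix.map Prod.fst).Nodup

instance (matrix : List (String × List String)) : Decidable (Pre_expand_matrix_py matrix) := by
  unfold Pre_expand_matrix_py; infer_instance

def pvWitness_expand_matrix_py : (List (String × List String)) :=
  [("a", ["1", "2"]), ("b", ["3"])]

def Spec_expand_matrix_py (matrix : List (String × List String)) (out : List (List (String × String))) : Prop := out = expand_matrix_py_alt matrix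
instance (matrix : List (String × List String)) (out : List (List (String × String))) : Decidable (Spec_expand_matrix_py matrix out) := by unfold Spec_expand_matrix_py; infer_instance

-- ===== CLAIM (what is proved, stated in full; the proofs are below) =====
def Claim_equal_expand_matrix_py : Prop := ∀ (matrix : List (String × List String)), Dom_expand_matrix_py matrix → Pre_expand_matrix_py matrix → Spec_expand_matrix_py matrix (expand_matrix_py matrix)

-- ===== LEMMAS AND PROOFS =====

theorem pvProduct_cons (h : List String) (t : List (List String)) :
    pvProduct (h :: t) = h.flatMap (fun v => (pvProduct t).map (fun r => v :: r)) := rfl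

-- A's grow loop over any key list, from any starting combos, is the tuple product zipped in:
-- each start combo is extended by every tuple of values of ks (update = the zip of inserts).
theorem expand_loop (d : PySem.Dict String (List String)) (ks : List String)
    (C : List (PySem.Dict String String)) :
    ks.foldl (fun combos key =>
        combos.foldl (fun newCombos combo =>
          ((d.get? key).getD []).foldl
            (fun newCombos val => newCombos ++ [combo.insert key val]) newCombos) []) C
    = C.flatMap (fun c =>
        (pvProduct (ks.map (fun k => (d.get? k).getD []))).map
          (fun t => PySem.Dict.update c (ks.zip t))) := by
  induction ks generalizing C with
  | nil => simp [pvProduct, PySem.Dict.update]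
  | cons k ks ih =>
      simp only [List.foldl_cons]
      have h1 : (fun (newCombos : List (PySem.Dict String String)) (combo : PySem.Dict String String) =>
            ((d.get? k).getD []).foldl
              (fun newCombos val => newCombos ++ [combo.insert k val]) newCombos)
          = fun newCombos combo =>
              newCombos ++ ((d.get? k).getD []).map (combo.insert k) := by
        funext newCombos combo
        exact PySem.List.foldl_append_singleton_eq_map _ _ _
      rw [h1, PySem.List.foldl_append_eq_flatMap, List.nil_append, ih]
      simp only [List.map_cons, pvProduct_cons, List.flatMap_assoc, List.flatMap_map,
        List.map_flatMap, List.map_map, Function.comp_def, PySem.Dict.update,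
        List.zip_cons_cons, List.foldl_cons]

-- ===== VERDICT (by name: the statement is the Claim_ definition above) =====
theorem expand_matrix_py_spec : Claim_equal_expand_matrix_py := by
  intro matrix _ hpre
  unfold Spec_expand_matrix_py expand_matrix_py expand_matrix_py_alt
  have hnd : (PySem.Dict.mk matrix).keys.Nodup := by
    simpa [PySem.Dict.keys, PySem.Dict.items] using hpre
  by_cases h : (PySem.Dict.mk matrix).keys = []
  · have hm : matrix = [] := by
      cases matrix with
      | nil => rfl
      | cons p r => simp [PySem.Dict.keys] at h
    subst hm
    simp [pvProduct, PySem.Dict.values, PySem.Dict.ofList,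
      PySem.Dict.update, PySem.Dict.empty]
  · simp only [h, expand_loop]
    rw [PySem.Dict.values_eq_map_keys _ hnd []]
    simp [PySem.Dict.getD_eq_get?_getD, PySem.Dict.ofList]
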